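-- pv_equiv track=rewrite | github.com/TUM-E21-ThinFilms/UXDConverter | uxdconverter/parser.py | _split_measurement_from_header
-- ===== SOURCE A (Python) =====
-- def _split_measurement_from_header(raw):
--
--     header = []
--     data = []
--
--     in_header = True
--
--     for line in raw:
--         # This header indicates the start of the data section
--         if line.startswith('_2THETACPS'):
--             in_header = False
--             continue
--
--         if in_header:
--             header.append(line)
--         else:
--             data.append(line)
--
--     return header, data
-- ===== SOURCE B (Python) =====
-- def _split_measurement_from_header(raw):
--     raw = list(raw)
--     marker = '_2THETACPS'
--     i = next((k for k, line in enumerate(raw) if line.startswith(marker)), None)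
--     if i is None:
--         return raw, []
--     return raw[:i], [line for line in raw[i + 1:] if not line.startswith(marker)]
-- ===== Notes on version B (the rewrite author's own statement) =====
-- stated objective: alternative
-- what changed: Replaces the single flag-carrying accumulating pass with an up-front search for the first marker index followed by slicing and a filter of the tail.
import Mathlib
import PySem

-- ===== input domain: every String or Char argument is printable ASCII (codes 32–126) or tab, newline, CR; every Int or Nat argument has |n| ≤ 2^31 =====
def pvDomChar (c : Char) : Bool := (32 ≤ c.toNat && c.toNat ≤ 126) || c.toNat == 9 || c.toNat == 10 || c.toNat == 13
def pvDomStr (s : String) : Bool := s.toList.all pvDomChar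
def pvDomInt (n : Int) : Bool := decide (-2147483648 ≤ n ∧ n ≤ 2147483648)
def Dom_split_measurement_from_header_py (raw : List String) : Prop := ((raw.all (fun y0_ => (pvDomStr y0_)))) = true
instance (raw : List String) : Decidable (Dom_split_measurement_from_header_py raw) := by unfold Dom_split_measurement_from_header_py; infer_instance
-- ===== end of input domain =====

-- B computes the split point up front and slices+filters, instead of A's flag-carrying accumulating pass (objective: alternative).

-- ===== PORT A =====
-- the for-loop over raw with state (header, data, in_header), as structural recursion
def splitLoopA (raw : List String) (header data : List String) (in_header : Bool) :
    List String × List String :=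
  match raw with
  | [] => (header, data)
  | line :: rest =>
    if PySem.Str.startswith line "_2THETACPS" then
      splitLoopA rest header data false
    else if in_header then
      splitLoopA rest (header ++ [line]) data in_header
    else
      splitLoopA rest header (data ++ [line]) in_header

def split_measurement_from_header_py (raw : List String) : List String × List String :=
  splitLoopA raw [] [] true

-- ===== PORT B =====
def split_measurement_from_header_py_alt (raw : List String) : List String × List String :=
  match raw.findIdx? (fun line => PySem.Str.startswith line "_2THETACPS") with
  | none => (raw, [])
  | some i => (raw.take i,
      (raw.drop (i + 1)).filter (fun line => !PySem.Str.startswith line "_2THETACPS"))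

-- ===== PRECONDITION & SPEC =====
def Spec_split_measurement_from_header_py (raw : List String) (out : List String × List String) : Prop := out = split_measurement_from_header_py_alt raw
instance (raw : List String) (out : List String × List String) : Decidable (Spec_split_measurement_from_header_py raw out) := by unfold Spec_split_measurement_from_header_py; infer_instance

-- ===== CLAIM (what is proved, stated in full; the proofs are below) =====
def Claim_equal_split_measurement_from_header_py : Prop := ∀ (raw : List String), Dom_split_measurement_from_header_py raw → Spec_split_measurement_from_header_py raw (split_measurement_from_header_py raw)

-- ===== LEMMAS AND PROOFS =====

-- once the flag is false, the loop just appends the non-marker lines to data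
theorem splitLoopA_false (raw : List String) (header data : List String) :
    splitLoopA raw header data false =
      (header, data ++ raw.filter (fun line => !PySem.Str.startswith line "_2THETACPS")) := by
  induction raw generalizing data with
  | nil => simp [splitLoopA]
  | cons line rest ih =>
    by_cases h : PySem.Str.startswith line "_2THETACPS" = true
    all_goals simp at h; simp [splitLoopA, h, ih]

theorem splitLoopA_true (raw : List String) (header : List String) :
    splitLoopA raw header [] true =
      (match raw.findIdx? (fun line => PySem.Str.startswith line "_2THETACPS") with
       | none => (header ++ raw, [])
       | some i => (header ++ raw.take i,
           (raw.drop (i + 1)).filter (fun line => !PySem.Str.startswith line "_2THETACPS"))) := by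
  induction raw generalizing header with
  | nil => simp [splitLoopA]
  | cons line rest ih =>
    by_cases h : PySem.Str.startswith line "_2THETACPS" = true
    · simp at h
      simp [splitLoopA, h, splitLoopA_false, List.findIdx?_cons]
    · simp at h
      simp [splitLoopA, h, ih, List.findIdx?_cons]
      cases hfi : List.findIdx? (fun line => PySem.Chars.startswith line.toList ['_', '2', 'T', 'H', 'E', 'T', 'A', 'C', 'P', 'S']) rest with
      | none => simp [hfi]
      | some i => simp [hfi]

-- ===== VERDICT (by name: the statement is the Claim_ definition above) =====
theorem split_measurement_from_header_py_spec : Claim_equal_split_measurement_from_header_py := by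
  intro raw _
  unfold Spec_split_measurement_from_header_py split_measurement_from_header_py
    split_measurement_from_header_py_alt
  rw [splitLoopA_true]
  cases raw.findIdx? (fun line => PySem.Str.startswith line "_2THETACPS") <;> simp
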